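-- pv_equiv track=rewrite | github.com/mangchhe/algorithm | tmp/programmers/크레인 인형뽑기 게임.py | solution
-- ===== SOURCE A (Python) =====
-- def solution(board, moves):
--     ans = 0
--     bucket = []
--     dolls = [[] for _ in range(len(board) + 1)]
--
--     for i in range(len(board)):
--         for j in range(len(board) - 1, -1, -1):
--             doll = board[j][i]
--             if doll:
--                 dolls[i + 1].append(doll)
--
--     for move in moves:
--         if not dolls[move]:
--             continue
--         doll = dolls[move].pop()
--         if bucket:
--             if bucket[-1] == doll:
--                 bucket.pop()
--                 ans += 2
--                 continue
--         bucket.append(doll)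
--
--     return ans
-- ===== SOURCE B (Python) =====
-- def solution(board, moves):
--     n = len(board)
--     # top[k]: next row to inspect for move k (1-based like the moves; slot 0 starts exhausted)
--     top = [n] + [0] * n
--     bucket = []
--     ans = 0
--     for move in moves:
--         r = top[move]
--         while r < n and not board[r][move - 1]:
--             r += 1
--         top[move] = r
--         if r == n:
--             continue
--         top[move] = r + 1
--         doll = board[r][move - 1]
--         if bucket and bucket[-1] == doll:
--             bucket.pop()
--             ans += 2
--         else:
--             bucket.append(doll)
--     return ans
-- ===== Notes on version B (the rewrite author's own statement) =====
-- stated objective: alternative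
-- what changed: A prebuilds every column's doll stack bottom-up before processing moves; B keeps only a 1-based per-column row pointer and scans each column lazily top-down while iterating the moves, reading the board interleaved with the match-stack logic.
-- outside the precondition, e.g. on solution([[1, 2], [1, 4]], [-1, -1]): A returns 0, B returns 2; on solution([[1]], [-1]): A returns 0, B raises IndexError
import Mathlib
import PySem

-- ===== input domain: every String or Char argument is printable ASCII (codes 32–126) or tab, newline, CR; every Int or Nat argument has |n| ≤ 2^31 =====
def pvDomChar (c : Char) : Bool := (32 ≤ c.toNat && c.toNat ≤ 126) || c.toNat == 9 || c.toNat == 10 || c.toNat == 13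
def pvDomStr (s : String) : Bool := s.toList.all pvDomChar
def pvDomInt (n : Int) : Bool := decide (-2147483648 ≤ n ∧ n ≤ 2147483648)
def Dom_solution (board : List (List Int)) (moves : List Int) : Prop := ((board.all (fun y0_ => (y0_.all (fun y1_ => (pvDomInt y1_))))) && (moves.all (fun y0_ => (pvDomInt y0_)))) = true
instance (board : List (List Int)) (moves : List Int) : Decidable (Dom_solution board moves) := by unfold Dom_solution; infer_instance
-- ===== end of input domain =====

-- B replaces A's upfront bottom-up build of every column's doll stack by a per-column row
-- pointer that scans each touched column lazily, top-down, during the moves loop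
-- (alternative decomposition, same cost class).

-- board[r][c], total form (both Pythons read cells only in range under Pre_)
def pvCell (board : List (List Int)) (r c : Int) : Int :=
  PySem.List.pyGetD (PySem.List.pyGetD board r []) c 0

-- ===== PORT A =====
def buildStep (board : List (List Int)) (d : List (List Int)) (i : Int) : List (List Int) :=
  (PySem.List.pyRange (PySem.List.len board - 1) (-1) (-1)).foldl
    (fun d j =>
      let doll := pvCell board j i
      if doll ≠ 0 then
        PySem.List.pySetD d (i + 1) (PySem.List.pyGetD d (i + 1) [] ++ [doll])
      else d) d

-- 'for move in moves: …' of A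
def loopA (dolls : List (List Int)) (bucket : List Int) (ans : Int) : List Int → Int
  | [] => ans
  | m :: rest =>
    let dm := PySem.List.pyGetD dolls m []
    if dm = [] then loopA dolls bucket ans rest
    else
      let doll := PySem.List.pyGetD dm (-1) 0
      let dolls' := PySem.List.pySetD dolls m dm.dropLast
      if bucket ≠ [] ∧ PySem.List.pyGetD bucket (-1) 0 = doll then
        loopA dolls' bucket.dropLast (ans + 2) rest
      else
        loopA dolls' (bucket ++ [doll]) ans rest

def solution (board : List (List Int)) (moves : List Int) : Int :=
  let dolls0 : List (List Int) :=
    (PySem.List.pyRange 0 (PySem.List.len board + 1) 1).map (fun _ => [])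
  let dolls := (PySem.List.pyRange 0 (PySem.List.len board) 1).foldl (buildStep board) dolls0
  loopA dolls [] 0 moves

-- ===== PORT B =====
-- 'while r < n and not board[r][c]: r += 1'
def scanB (board : List (List Int)) (c : Int) (r : Nat) : Nat :=
  if r < board.length then
    (if pvCell board r c = 0 then scanB board c (r + 1) else r)
  else r
termination_by board.length - r
-- 'for move in moves: …' of B
def loopB (board : List (List Int)) (top : List Nat) (bucket : List Int) (ans : Int) :
    List Int → Int
  | [] => ans
  | m :: rest =>
    let t := PySem.List.pyGetD top m 0
    let r := scanB board (m - 1) t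
    let top1 := PySem.List.pySetD top m r
    if r = board.length then loopB board top1 bucket ans rest
    else
      let top2 := PySem.List.pySetD top1 m (r + 1)
      let doll := pvCell board (r : Int) (m - 1)
      if bucket ≠ [] ∧ PySem.List.pyGetD bucket (-1) 0 = doll then
        loopB board top2 bucket.dropLast (ans + 2) rest
      else
        loopB board top2 (bucket ++ [doll]) ans rest

def solution_alt (board : List (List Int)) (moves : List Int) : Int :=
  loopB board (board.length :: List.replicate board.length 0) [] 0 moves

-- ===== PRECONDITION & SPEC =====
-- Pre_ restricts to the task's natural domain and to where the Python A returns: every row at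
-- least as long as the board is high (a shorter row makes A raise IndexError during the build),
-- and no negative move: on a negative move A's 1-based dolls table wraps onto one column while
-- B's 1-based pointer array and its cell reads wrap onto a different one (both accidents of
-- Python negative indexing); move 0 — the deliberately empty 1-based slot — stays admitted.
def Pre_solution (board : List (List Int)) (moves : List Int) : Prop :=
  (∀ row ∈ board, board.length ≤ row.length) ∧
  (∀ m ∈ moves, 0 ≤ m ∧ m ≤ (board.length : Int))
instance (board : List (List Int)) (moves : List Int) : Decidable (Pre_solution board moves) := by
  unfold Pre_solution; infer_instance

def pvWitness_solution : List (List Int) × List Int := ([[0, 0], [1, 1]], [1, 2])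

def Spec_solution (board : List (List Int)) (moves : List Int) (out : Int) : Prop := out = solution_alt board moves
instance (board : List (List Int)) (moves : List Int) (out : Int) : Decidable (Spec_solution board moves out) := by unfold Spec_solution; infer_instance

-- ===== CLAIM (what is proved, stated in full; the proofs are below) =====
def Claim_equal_solution : Prop := ∀ (board : List (List Int)) (moves : List Int), Dom_solution board moves → Pre_solution board moves → Spec_solution board moves (solution board moves)

-- ===== LEMMAS AND PROOFS =====

-- the non-empty cells of column c of the board, from row t downwards, top to bottom
def colFrom (board : List (List Int)) (c : Int) (t : Nat) : List Int :=
  if t < board.length then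
    (if pvCell board t c = 0 then colFrom board c (t + 1)
     else pvCell board t c :: colFrom board c (t + 1))
  else []
termination_by board.length - t
theorem colFrom_eq_filterMap (board : List (List Int)) (c : Int) (t : Nat) :
    colFrom board c t =
      (PySem.List.pyRange (t : Int) (board.length : Int) 1).filterMap
        (fun j => if pvCell board j c ≠ 0 then some (pvCell board j c) else none) := by
  fun_induction colFrom board c t with
  | case1 t h h0 ih =>
    rw [PySem.List.pyRange_one_cons (by exact_mod_cast h)]
    simp only [List.filterMap_cons, h0]
    push_cast at ih ⊢
    simp [ih]
  | case2 t h h0 ih =>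
    rw [PySem.List.pyRange_one_cons (by exact_mod_cast h)]
    simp only [List.filterMap_cons]
    push_cast at ih ⊢
    simp [ih, h0]
  | case3 t h =>
    rw [PySem.List.pyRange_one_eq_nil (by exact_mod_cast Nat.le_of_not_lt h)]
    rfl
theorem scanB_le (board : List (List Int)) (c : Int) (t : Nat) (h : t ≤ board.length) :
    scanB board c t ≤ board.length := by
  fun_induction scanB board c t with
  | case1 t h1 h0 ih => exact ih h1
  | case2 t h1 h0 => exact Nat.le_of_lt h1
  | case3 t h1 => exact h
theorem colFrom_scan (board : List (List Int)) (c : Int) (t : Nat) :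
    colFrom board c t =
      if scanB board c t < board.length then
        pvCell board (scanB board c t) c :: colFrom board c (scanB board c t + 1)
      else [] := by
  fun_induction scanB board c t with
  | case1 t h1 h0 ih => rw [colFrom, if_pos h1, if_pos h0]; exact ih
  | case2 t h1 h0 => rw [colFrom, if_pos h1, if_neg h0, if_pos h1]
  | case3 t h1 => rw [colFrom, if_neg h1, if_neg h1]
theorem foldl_set_append (g : Int → Int) (k : Nat) :
    ∀ (js : List Int) (d : List (List Int)), k < d.length →
      js.foldl (fun d j =>
          if g j ≠ 0 then
            PySem.List.pySetD d (k : Int) (PySem.List.pyGetD d (k : Int) [] ++ [g j])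
          else d) d
        = d.set k (d.getD k [] ++
            js.filterMap (fun j => if g j ≠ 0 then some (g j) else none)) := by
  intro js
  induction js with
  | nil =>
    intro d hk
    simp [List.getD, List.getElem?_eq_getElem hk, List.set_getElem_self]
  | cons j js ih =>
    intro d hk
    by_cases h0 : g j = 0
    · rw [List.foldl_cons, if_neg (by simpa using h0), ih d hk]
      simp [h0]
    · rw [List.foldl_cons, if_pos (by simpa using h0),
        ih (PySem.List.pySetD d (k : Int) (PySem.List.pyGetD d (k : Int) [] ++ [g j]))
          (by simpa using hk)]
      simp only [PySem.List.pySetD_natCast, PySem.List.pyGetD_natCast]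
      rw [show (d.set k (d.getD k [] ++ [g j])).getD k [] = d.getD k [] ++ [g j] from by
        rw [List.getD, List.getElem?_set_self hk]; rfl]
      simp [h0, List.set_set, List.append_assoc]
theorem buildStep_spec (board : List (List Int)) (d : List (List Int)) (i : Nat)
    (hi : i + 1 < d.length) :
    buildStep board d (i : Int) =
      d.set (i + 1) (d.getD (i + 1) [] ++ (colFrom board (i : Int) 0).reverse) := by
  have hcast : (i : Int) + 1 = ((i + 1 : Nat) : Int) := by push_cast; ring
  rw [buildStep]
  simp only [PySem.List.len_eq, hcast]
  rw [foldl_set_append (fun j => pvCell board j (i : Int)) (i + 1) _ d hi]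
  congr 1
  rw [show ((board.length : Int) - 1) = (-1) + 1 + (board.length : Int) - 1 by ring]
  rw [show (PySem.List.pyRange ((-1) + 1 + (board.length : Int) - 1) (-1) (-1) : List Int)
        = (PySem.List.pyRange 0 (board.length : Int) 1).reverse from by
    rw [PySem.List.pyRange_neg_one_eq_reverse]; norm_num]
  rw [List.filterMap_reverse]
  have hcf := colFrom_eq_filterMap board (i : Int) 0
  simp only [Nat.cast_zero] at hcf
  rw [← hcf]
theorem build_fold (board : List (List Int)) :
    ∀ (i : Nat), i ≤ board.length → ∀ (d : List (List Int)), d.length = board.length + 1 →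
      ((PySem.List.pyRange (i : Int) (board.length : Int) 1).foldl (buildStep board) d).length
          = d.length ∧
      ((PySem.List.pyRange (i : Int) (board.length : Int) 1).foldl (buildStep board) d).getD 0 []
          = d.getD 0 [] ∧
      ∀ k, k < board.length →
        ((PySem.List.pyRange (i : Int) (board.length : Int) 1).foldl (buildStep board) d).getD (k + 1) []
          = if i ≤ k then d.getD (k + 1) [] ++ (colFrom board (k : Int) 0).reverse
            else d.getD (k + 1) [] := by
  intro i
  induction hfuel : board.length - i generalizing i with
  | zero =>
    intro hi d hd
    have hin : i = board.length := by omega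
    rw [PySem.List.pyRange_one_eq_nil (by exact_mod_cast le_of_eq hin.symm)]
    refine ⟨rfl, rfl, fun k hk => ?_⟩
    rw [if_neg (by omega)]
    rfl
  | succ f ih =>
    intro hi d hd
    have hlt : i < board.length := by omega
    rw [PySem.List.pyRange_one_cons (by exact_mod_cast hlt), List.foldl_cons,
      buildStep_spec board d i (by omega),
      show (i : Int) + 1 = ((i + 1 : Nat) : Int) from by push_cast; ring]
    obtain ⟨hl, h0, hk⟩ := ih (i + 1) (by omega) (by omega)
      (d.set (i + 1) (d.getD (i + 1) [] ++ (colFrom board (i : Int) 0).reverse))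
      (by simp [hd])
    refine ⟨by rw [hl]; simp, ?_, fun k hk' => ?_⟩
    · rw [h0, List.getD, List.getElem?_set_ne (by omega : i + 1 ≠ 0)]
      rfl
    rw [hk k hk']
    by_cases hik : i + 1 ≤ k
    · rw [if_pos hik, if_pos (by omega)]
      congr 1
      simp [List.getD, List.getElem?_set_ne (show i + 1 ≠ k + 1 by omega)]
    · by_cases hek : i ≤ k
      · have : k = i := by omega
        subst this
        rw [if_neg hik, if_pos le_rfl]
        simp [List.getD, List.getElem?_set_self (show k + 1 < d.length by omega)]
      · rw [if_neg hik, if_neg hek]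
        simp [List.getD, List.getElem?_set_ne (show i + 1 ≠ k + 1 by omega)]
theorem loop_eq (board : List (List Int)) :
    ∀ (moves : List Int) (dolls : List (List Int)) (top : List Nat)
      (bucket : List Int) (ans : Int),
      dolls.length = board.length + 1 →
      top.length = board.length + 1 →
      top.getD 0 0 = board.length →
      (∀ c, c < board.length → top.getD (c + 1) 0 ≤ board.length) →
      dolls.getD 0 [] = [] →
      (∀ c, c < board.length →
        dolls.getD (c + 1) [] = (colFrom board (c : Int) (top.getD (c + 1) 0)).reverse) →
      (∀ m ∈ moves, 0 ≤ m ∧ m ≤ (board.length : Int)) →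
      loopA dolls bucket ans moves = loopB board top bucket ans moves := by
  intro moves
  induction moves with
  | nil => intro dolls top bucket ans _ _ _ _ _ _ _; rfl
  | cons m rest ih =>
    intro dolls top bucket ans hdl htl hs0 htb h0 hinv hmv
    obtain ⟨hm0, hm2⟩ := hmv m (List.mem_cons_self)
    have hmv' : ∀ x ∈ rest, 0 ≤ x ∧ x ≤ (board.length : Int) :=
      fun x hx => hmv x (List.mem_cons_of_mem _ hx)
    simp only [loopA, loopB]
    by_cases hm1 : 1 ≤ m
    case neg =>
      -- move 0: A finds its dummy slot 0 empty, B finds its slot-0 pointer exhausted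
      have hz : m = 0 := by omega
      subst hz
      rw [PySem.List.pyGetD_zero, h0, if_pos rfl, PySem.List.pyGetD_zero, hs0,
        show scanB board (0 - 1) board.length = board.length from by
          rw [scanB, if_neg (lt_irrefl _)],
        if_pos rfl,
        show PySem.List.pySetD top (0 : Int) board.length = top.set 0 board.length from by
          simp [PySem.List.pySetD, PySem.List.pySet?, PySem.List.pyIdx?,
            show 0 < top.length by omega]]
      refine ih dolls _ bucket ans hdl (by simp [htl]) ?_ ?_ h0 ?_ hmv'
      · rw [List.getD, List.getElem?_set_self (by omega)]; rfl
      · intro c' hc'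
        rw [List.getD, List.getElem?_set_ne (by omega : (0 : Nat) ≠ c' + 1)]
        simpa [List.getD] using htb c' hc'
      · intro c' hc'
        have h1 : (top.set 0 board.length).getD (c' + 1) 0 = top.getD (c' + 1) 0 := by
          rw [List.getD, List.getElem?_set_ne (by omega : (0 : Nat) ≠ c' + 1)]; rfl
        rw [h1]
        exact hinv c' hc'
    have hc : (m - 1).toNat < board.length := by omega
    have hmc2 : m = ((((m - 1).toNat + 1 : Nat)) : Int) := by push_cast; omega
    have ht := htb (m - 1).toNat hc
    rw [hmc2, PySem.List.pyGetD_natCast, hinv (m - 1).toNat hc, PySem.List.pyGetD_natCast]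
    rw [show ((((m - 1).toNat + 1 : Nat)) : Int) - 1 = (((m - 1).toNat : Nat) : Int) from by
      push_cast; ring]
    rw [colFrom_scan board (((m - 1).toNat : Nat) : Int) (top.getD ((m - 1).toNat + 1) 0)]
    set cN := (m - 1).toNat with hcdef
    set t := top.getD (cN + 1) 0 with htdef
    set r := scanB board (cN : Int) t with hrdef
    by_cases hr : r < board.length
    · rw [if_pos hr, if_neg (by omega : ¬ r = board.length)]
      simp only [List.reverse_cons]
      rw [if_neg (by simp)]
      rw [PySem.List.pyGetD_neg_one_append_singleton, List.dropLast_concat]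
      simp only [PySem.List.pySetD_natCast, List.set_set]
      have hIH : ∀ (b' : List Int) (a' : Int),
          loopA (dolls.set (cN + 1) (colFrom board (cN : Int) (r + 1)).reverse) b' a' rest
            = loopB board (top.set (cN + 1) (r + 1)) b' a' rest := by
        intro b' a'
        refine ih _ _ _ _ (by simp [hdl]) (by simp [htl])
          (by rw [List.getD, List.getElem?_set_ne (by omega : cN + 1 ≠ 0)]
              simpa [List.getD] using hs0) ?_
          (by rw [List.getD, List.getElem?_set_ne (by omega : cN + 1 ≠ 0)]; exact h0) ?_ hmv'
        · intro c' hc'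
          by_cases hcc : c' = cN
          · subst hcc
            rw [List.getD, List.getElem?_set_self (by omega)]
            simp only [Option.getD_some]
            omega
          · rw [List.getD, List.getElem?_set_ne (by omega : ¬ cN + 1 = c' + 1)]
            simpa [List.getD] using htb c' hc'
        · intro c' hc'
          by_cases hcc : c' = cN
          · subst hcc
            have h1 : (top.set (cN + 1) (r + 1)).getD (cN + 1) 0 = r + 1 := by
              rw [List.getD, List.getElem?_set_self (by omega)]; rfl
            rw [h1, List.getD, List.getElem?_set_self (by omega)]
            rfl
          · have h1 : (top.set (cN + 1) (r + 1)).getD (c' + 1) 0 = top.getD (c' + 1) 0 := by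
              rw [List.getD, List.getElem?_set_ne (by omega : ¬ cN + 1 = c' + 1)]; rfl
            rw [h1, List.getD, List.getElem?_set_ne (by omega : ¬ cN + 1 = c' + 1)]
            simpa [List.getD] using hinv c' hc'
      by_cases hb : bucket ≠ [] ∧
          PySem.List.pyGetD bucket (-1) 0 = pvCell board (r : Int) (cN : Int)
      · rw [if_pos hb, if_pos hb, hIH]
      · rw [if_neg hb, if_neg hb, hIH]
    · have hrn : r = board.length := by
        have := scanB_le board (cN : Int) t ht
        omega
      rw [if_neg hr, if_pos hrn, List.reverse_nil, if_pos rfl]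
      rw [PySem.List.pySetD_natCast]
      refine ih _ _ _ _ hdl (by simp [htl])
        (by rw [List.getD, List.getElem?_set_ne (by omega : cN + 1 ≠ 0)]
            simpa [List.getD] using hs0) ?_ h0 ?_ hmv'
      · intro c' hc'
        by_cases hcc : c' = cN
        · subst hcc
          rw [List.getD, List.getElem?_set_self (by omega)]
          simp only [Option.getD_some]
          omega
        · rw [List.getD, List.getElem?_set_ne (by omega : ¬ cN + 1 = c' + 1)]
          simpa [List.getD] using htb c' hc'
      · intro c' hc'
        by_cases hcc : c' = cN
        · subst hcc
          have htop' : (top.set (cN + 1) r).getD (cN + 1) 0 = r := by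
            rw [List.getD, List.getElem?_set_self (by omega)]; rfl
          rw [htop', hinv cN hc', colFrom_scan board (cN : Int) t, ← hrdef, if_neg hr]
          rw [show colFrom board (cN : Int) r = [] from by rw [colFrom, if_neg (by omega)]]
        · have h1 : (top.set (cN + 1) r).getD (c' + 1) 0 = top.getD (c' + 1) 0 := by
            rw [List.getD, List.getElem?_set_ne (by omega : ¬ cN + 1 = c' + 1)]; rfl
          rw [h1]
          exact hinv c' hc'
theorem solution_eq_alt (board : List (List Int)) (moves : List Int)
    (hmv : ∀ m ∈ moves, 0 ≤ m ∧ m ≤ (board.length : Int)) :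
    solution board moves = solution_alt board moves := by
  unfold solution solution_alt
  simp only [PySem.List.len_eq]
  have hd0len : ((PySem.List.pyRange 0 ((board.length : Int) + 1) 1).map
      (fun _ => ([] : List Int))).length = board.length + 1 := by
    simp [PySem.List.length_pyRange_one]
  have hbf := build_fold board 0 (Nat.zero_le _) _ hd0len
  simp only [Nat.cast_zero] at hbf
  obtain ⟨hlen, h0get, hget⟩ := hbf
  refine loop_eq board moves _ _ [] 0 (by rw [hlen, hd0len]) (by simp) rfl ?_ ?_ ?_ hmv
  · intro c hc
    simp [List.getD, hc]
  · rw [h0get]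
    cases (PySem.List.pyRange 0 ((board.length : Int) + 1) 1)[0]? <;> simp [List.getD]
  · intro c hc
    rw [hget c hc, if_pos (Nat.zero_le c)]
    have hz : ((PySem.List.pyRange 0 ((board.length : Int) + 1) 1).map
        (fun _ => ([] : List Int))).getD (c + 1) [] = [] := by
      cases (PySem.List.pyRange 0 ((board.length : Int) + 1) 1)[c + 1]? <;>
        simp [List.getD]
    rw [hz]
    have hr2 : (board.length :: List.replicate board.length (0 : Nat)).getD (c + 1) 0 = 0 := by
      simp [List.getD, hc]
    rw [hr2]
    simp

-- ===== VERDICT (by name: the statement is the Claim_ definition above) =====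
theorem solution_spec : Claim_equal_solution := by
  intro board moves _dom hpre
  unfold Spec_solution
  exact solution_eq_alt board moves hpre.2
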